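-- pv_equiv track=rewrite | github.com/samerjessy02/mini-pandas-fromScratch | stats.py | get_col_mode
-- ===== SOURCE A (Python) =====
-- def get_col_mode(col:list):
--     clean_col = [elem for elem in col if not elem is None]
--     freq_dict = {}
--     if col:
--         for elem in clean_col:
--             freq_dict[elem]  = freq_dict.get(elem , 0) + 1
--         return sorted(freq_dict.items(), key=lambda item : item[1], reverse=True)[0][0]
--     else:
--         return None
-- ===== SOURCE B (Python) =====
-- def get_col_mode(col: list):
--     clean = [e for e in col if e is not None]
--     if not col:
--         return None
--     best = max((clean.count(e) for e in clean), default=0)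
--     return [e for e in clean if clean.count(e) == best][0]
-- ===== Notes on version B (the rewrite author's own statement) =====
-- stated objective: alternative
-- what changed: A builds a frequency dict and stably sorts its items descending by count to take the top key; B drops the dict and sort entirely, using repeated list.count scans: it takes max of the counts (default 0) and returns the first element whose count equals that maximum.
import Mathlib
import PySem

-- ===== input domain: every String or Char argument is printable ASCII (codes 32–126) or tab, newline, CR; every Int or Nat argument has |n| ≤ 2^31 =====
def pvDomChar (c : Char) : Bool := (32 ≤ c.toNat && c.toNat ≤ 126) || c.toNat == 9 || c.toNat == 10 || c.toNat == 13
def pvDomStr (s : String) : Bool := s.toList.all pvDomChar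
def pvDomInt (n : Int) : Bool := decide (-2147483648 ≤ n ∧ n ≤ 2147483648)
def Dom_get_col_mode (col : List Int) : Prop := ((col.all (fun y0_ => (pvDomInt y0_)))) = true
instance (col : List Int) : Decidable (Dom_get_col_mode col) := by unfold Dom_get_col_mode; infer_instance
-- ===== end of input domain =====

-- B replaces A's frequency dict + descending stable sort by repeated list.count scans with
-- max(..., default=0) and a first-match filter (objective: alternative, same observable result).


-- ===== PORT A =====
def get_col_mode (col : List Int) : Option Int :=
  -- 'elem is None' never holds for an Int element, so the comprehension keeps everything
  let clean_col := col
  let freq_dict : PySem.Dict Int Int :=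
    clean_col.foldl (fun d elem => d.insert elem (d.getD elem 0 + 1)) PySem.Dict.empty
  if col ≠ [] then
    (PySem.List.pyGet? (PySem.List.sorted freq_dict.items (fun item => item.2) true) 0).map
      (fun p => p.1)
  else
    none

-- ===== PORT B =====
def get_col_mode_alt (col : List Int) : Option Int :=
  -- 'e is not None' always holds for an Int element, so clean = col
  let clean := col
  if col = [] then none
  else
    let best :=
      PySem.List.maxD (clean.map (fun e => (PySem.List.count clean e : Int))) (fun x => x) 0
    PySem.List.pyGet? (clean.filter (fun e => (PySem.List.count clean e : Int) == best)) 0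

-- ===== PRECONDITION & SPEC =====
def Spec_get_col_mode (col : List Int) (out : Option Int) : Prop := out = get_col_mode_alt col
instance (col : List Int) (out : Option Int) : Decidable (Spec_get_col_mode col out) := by unfold Spec_get_col_mode; infer_instance

-- ===== CLAIM (what is proved, stated in full; the proofs are below) =====
def Claim_equal_get_col_mode : Prop := ∀ (col : List Int), Dom_get_col_mode col → Spec_get_col_mode col (get_col_mode col)

-- ===== LEMMAS AND PROOFS =====

-- Python xs[0] is head? (IndexError = none exactly on []).
theorem pyGet?_zero_eq_head? {α : Type} (l : List α) : PySem.List.pyGet? l 0 = l.head? := by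
  cases l <;> simp [PySem.List.pyGet?, PySem.List.pyIdx?]

-- Stability of the descending insertion sort: the head of sorted(xs, key, reverse=True) is the
-- FIRST element of xs whose key is maximal.
theorem head?_sorted_rev {α : Type} (xs : List α) (key : α → Int) :
    (PySem.List.sorted xs key true).head? =
      xs.find? (fun a => xs.all (fun y => decide (key y ≤ key a))) := by
  induction xs using List.reverseRecOn with
  | nil => rfl
  | append_singleton p x ih =>
    rw [PySem.List.sorted_rev_eq_foldl_insertBy] at *
    rw [List.foldl_append, List.foldl_cons, List.foldl_nil]
    cases hl : List.foldl (fun acc x => PySem.List.insertBy (fun a b => decide (key b < key a)) x acc) [] p with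
    | nil =>
      have hp : p = [] := by
        have := (PySem.List.sorted_eq_nil_iff p key true)
        rw [PySem.List.sorted_rev_eq_foldl_insertBy] at this
        exact this.mp hl
      subst hp
      simp [PySem.List.insertBy]
    | cons y ys =>
      have hy : p.find? (fun a => p.all (fun y => decide (key y ≤ key a))) = some y := by
        rw [← ih, hl]; rfl
      have hpy := List.find?_some hy
      have hmax : ∀ z ∈ p, key z ≤ key y := by
        intro z hz; simpa using (List.all_eq_true.mp hpy) z hz
      obtain ⟨-, as, bs, hdecomp, hfail⟩ := List.find?_eq_some_iff_append.mp hy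
      by_cases hxy : key y < key x
      · -- x becomes the new head; no element of p can satisfy the new predicate
        rw [PySem.List.insertBy]
        simp only [hxy, decide_true, if_true]
        have hnone : List.find? (fun a => (p ++ [x]).all (fun y => decide (key y ≤ key a))) p = none := by
          rw [List.find?_eq_none]
          intro z hz hcontra
          have hxz : key x ≤ key z := by
            have := (List.all_eq_true.mp hcontra) x (by simp)
            simpa using this
          have := hmax z hz
          omega
        have hx : ((p ++ [x]).all (fun y => decide (key y ≤ key x))) = true := by
          rw [List.all_eq_true]
          intro z hz
          rcases List.mem_append.mp hz with h1 | h1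
          · have := hmax z h1; simp; omega
          · simp at h1; subst h1; simp
        rw [List.find?_append, hnone, Option.none_or]
        simp only [List.find?_cons, hx]
        rfl
      · -- head stays y; y is still the first maximal element
        rw [PySem.List.insertBy]
        simp only [hxy, decide_false]
        rw [if_neg (by simp)]
        have hfirst : (p ++ [x]).find? (fun a => (p ++ [x]).all (fun y => decide (key y ≤ key a))) = some y := by
          rw [hdecomp, List.append_assoc, List.cons_append]
          rw [List.find?_append]
          have hasnone : List.find? (fun a => (as ++ (y :: (bs ++ [x]))).all (fun y => decide (key y ≤ key a))) as = none := by
            rw [List.find?_eq_none]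
            intro z hz hcontra
            have hzp := hfail z hz
            have hex : ∃ w ∈ p, ¬ (key w ≤ key z) := by simpa using hzp
            obtain ⟨w, hw, hwz⟩ := hex
            have hwmem : w ∈ as ++ (y :: (bs ++ [x])) := by
              have : w ∈ as ++ y :: bs := hdecomp ▸ hw
              simp at this ⊢; tauto
            have := (List.all_eq_true.mp hcontra) w hwmem
            simp at this; omega
          have hyall : ((as ++ (y :: (bs ++ [x]))).all (fun z => decide (key z ≤ key y))) = true := by
            rw [List.all_eq_true]
            intro z hz
            have hz' : z ∈ p ∨ z = x := by
              rw [hdecomp]; simp at hz ⊢; tauto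
            rcases hz' with h1 | h1
            · have := hmax z h1; simp; omega
            · subst h1; simp; omega
          rw [hasnone, Option.none_or]
          simp only [List.find?_cons, hyall]
        rw [hfirst]
        rfl

-- find? over the Python-set dedup of l equals find? over l (a value-only predicate sees the
-- first occurrence either way); proved with a generalized accumulator.
theorem find?_foldl_add {q : Int → Bool} (l : List Int) : ∀ s : List Int,
    (List.foldl PySem.Set.add s l).find? q = (s.find? q).or (l.find? q) := by
  induction l with
  | nil => intro s; simp
  | cons x xs ih =>
    intro s
    simp only [List.foldl_cons, ih]
    unfold PySem.Set.add
    by_cases hc : PySem.Set.contains s x = true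
    · rw [if_pos hc]
      cases hqx : q x with
      | false => simp [hqx]
      | true =>
        have hx : x ∈ s := by simpa [PySem.Set.contains] using hc
        have : (s.find? q).isSome := List.find?_isSome.mpr ⟨x, hx, hqx⟩
        obtain ⟨v, hv⟩ := Option.isSome_iff_exists.mp this
        simp [hqx, hv]
    · rw [if_neg hc]
      rw [List.find?_append, Option.or_assoc]
      congr 1
      cases hqx : q x <;> simp [hqx]

theorem find?_ofList {q : Int → Bool} (l : List Int) :
    (PySem.Set.ofList l).find? q = l.find? q := by
  have := find?_foldl_add (q := q) l (PySem.Set.empty)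
  simpa [PySem.Set.ofList, PySem.Set.empty] using this

theorem all_ofList (l : List Int) (g : Int → Bool) : (PySem.Set.ofList l).all g = l.all g := by
  rw [Bool.eq_iff_iff, List.all_eq_true, List.all_eq_true]
  constructor
  · intro H z hz; exact H z ((PySem.Set.mem_ofList l z).mpr hz)
  · intro H z hz; exact H z ((PySem.Set.mem_ofList l z).mp hz)

-- find? only looks at members.
theorem find?_congr_mem {α : Type} {p q : α → Bool} (l : List α)
    (h : ∀ a ∈ l, p a = q a) : l.find? p = l.find? q := by
  induction l with
  | nil => rfl
  | cons x xs ih =>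
    simp only [List.find?_cons, h x (by simp)]
    cases hq : q x with
    | true => rfl
    | false => exact ih (fun a ha => h a (by simp [ha]))

-- A returns the first element of col with maximal count (nonempty col).
theorem get_col_mode_eq_find (col : List Int) (h : col ≠ []) :
    get_col_mode col =
      col.find? (fun a => col.all (fun y => decide ((List.count y col : Int) ≤ (List.count a col : Int)))) := by
  simp only [get_col_mode]
  rw [if_pos h]
  have hfreq : (col.foldl (fun d elem => d.insert elem (d.getD elem 0 + 1)) (PySem.Dict.empty : PySem.Dict Int Int))
      = PySem.Dict.counter col := rfl
  rw [hfreq, PySem.Dict.items_counter]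
  rw [pyGet?_zero_eq_head?, head?_sorted_rev, List.find?_map, Option.map_map]
  simp only [Function.comp_def, List.all_map]
  have hpred : (fun k => ((PySem.Set.ofList col).all fun y => decide ((↑(List.count y col):Int) ≤ ↑(List.count k col))))
      = (fun k => (col.all fun y => decide ((↑(List.count y col):Int) ≤ ↑(List.count k col)))) := by
    funext k; exact all_ofList col _
  rw [hpred, find?_ofList]
  simp

-- B returns the first element of col with maximal count (nonempty col).
theorem get_col_mode_alt_eq_find (col : List Int) (h : col ≠ []) :
    get_col_mode_alt col =
      col.find? (fun a => col.all (fun y => decide ((List.count y col : Int) ≤ (List.count a col : Int)))) := by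
  simp only [get_col_mode_alt]
  rw [if_neg h]
  rw [pyGet?_zero_eq_head?, List.head?_filter]
  have hne : col.map (fun e => (PySem.List.count col e : Int)) ≠ [] := by
    simpa using h
  obtain ⟨M, hM⟩ : ∃ M, PySem.List.max? (col.map (fun e => (PySem.List.count col e : Int))) (fun x => x) = some M := by
    cases hmm : PySem.List.max? (col.map (fun e => (PySem.List.count col e : Int))) (fun x => x) with
    | none => exact absurd ((PySem.List.max?_eq_none_iff _ _).mp hmm) hne
    | some m => exact ⟨m, rfl⟩
  have hmem := PySem.List.max?_mem hM
  obtain ⟨e0, he0, he0M⟩ := List.mem_map.mp hmem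
  have hbound : ∀ v ∈ col.map (fun e => (PySem.List.count col e : Int)), v ≤ M := by
    intro v hv; exact PySem.List.max?_isMax hM v hv
  have hmaxD : PySem.List.maxD (col.map (fun e => (PySem.List.count col e : Int))) (fun x => x) 0 = M := by
    simp only [PySem.List.maxD, hM, Option.getD_some]
  rw [hmaxD]
  apply find?_congr_mem
  intro a ha
  rw [Bool.eq_iff_iff, beq_iff_eq, List.all_eq_true]
  simp only [PySem.List.count_eq, decide_eq_true_eq]
  constructor
  · intro hEq y hy
    have : (List.count y col : Int) ∈ col.map (fun e => (PySem.List.count col e : Int)) := by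
      simp only [PySem.List.count_eq] at *
      exact List.mem_map.mpr ⟨y, hy, rfl⟩
    have := hbound _ this
    omega
  · intro hall
    have h1 : (List.count a col : Int) ≤ M := by
      have : (List.count a col : Int) ∈ col.map (fun e => (PySem.List.count col e : Int)) := by
        simp only [PySem.List.count_eq]
        exact List.mem_map.mpr ⟨a, ha, rfl⟩
      exact hbound _ this
    have h2 : M ≤ (List.count a col : Int) := by
      rw [← he0M]
      simp only [PySem.List.count_eq]
      exact hall e0 he0
    omega

-- ===== VERDICT (by name: the statement is the Claim_ definition above) =====
theorem get_col_mode_spec : Claim_equal_get_col_mode := by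
  intro col _
  unfold Spec_get_col_mode
  by_cases h : col = []
  · subst h; rfl
  · rw [get_col_mode_eq_find col h, get_col_mode_alt_eq_find col h]
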